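-- pv_equiv track=rewrite | github.com/hu568/Meow_Academy | 2. 智能体层 (Agent Layer)/2.1 中央调度/intent_classifier.py | _resolve_tie
-- ===== SOURCE A (Python) =====
-- from typing import Dict, List, Tuple, Optional
--
-- def _resolve_tie(intents: List[str], text: str) -> str:
--     """解决多个意图得分相同的情况"""
--     # 优先级顺序
--     priority_order = [
--         "knowledge_query",
--         "learning_explanation",
--         "practice_testing",
--         "progress_review",
--         "emotional_support",
--         "system_configuration"
--     ]
--
--     for intent in priority_order:
--         if intent in intents:
--             return intent
--
--     # 如果都不在优先级列表中，返回第一个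
--     return intents[0]
-- ===== SOURCE B (Python) =====
-- from typing import List
--
-- _PRIORITY_ORDER = [
--     "knowledge_query",
--     "learning_explanation",
--     "practice_testing",
--     "progress_review",
--     "emotional_support",
--     "system_configuration",
-- ]
--
-- _RANK = {name: i for i, name in enumerate(_PRIORITY_ORDER)}
--
--
-- def _resolve_tie(intents: List[str], text: str) -> str:
--     """解决多个意图得分相同的情况"""
--     sentinel = len(_PRIORITY_ORDER)
--     best = intents[0]
--     best_rank = _RANK.get(best, sentinel)
--     for intent in intents[1:]:
--         r = _RANK.get(intent, sentinel)
--         if r < best_rank: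
--             best, best_rank = intent, r
--     return best
-- ===== Notes on version B (the rewrite author's own statement) =====
-- stated objective: idiomatic
-- what changed: Instead of scanning the fixed priority list and testing membership of each priority name in the candidates, B builds a rank index once and does a single min-scan over the candidates keeping the lowest-rank intent (strict < so the earliest candidate wins among unknowns).
import Mathlib
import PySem

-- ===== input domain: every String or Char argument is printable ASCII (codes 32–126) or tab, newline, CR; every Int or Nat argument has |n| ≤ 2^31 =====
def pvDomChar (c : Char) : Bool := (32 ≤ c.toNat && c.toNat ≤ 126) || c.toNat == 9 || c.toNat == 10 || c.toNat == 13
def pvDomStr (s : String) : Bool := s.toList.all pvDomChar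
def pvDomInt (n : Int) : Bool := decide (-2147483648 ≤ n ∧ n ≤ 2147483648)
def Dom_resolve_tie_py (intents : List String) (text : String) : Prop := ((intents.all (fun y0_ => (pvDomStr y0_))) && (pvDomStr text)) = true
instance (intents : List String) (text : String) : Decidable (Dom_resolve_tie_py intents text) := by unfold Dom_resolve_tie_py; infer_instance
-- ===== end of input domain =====

-- B replaces A's scan of the fixed priority list (one membership test per priority name)
-- by a rank index and a single min-scan over the candidates; objective: idiomatic.

-- ===== PORT A =====
def pvPriorityOrder : List String :=
  ["knowledge_query", "learning_explanation", "practice_testing",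
   "progress_review", "emotional_support", "system_configuration"]

-- the 'for intent in priority_order' loop of A
def pvALoop (intents : List String) : List String → String
  | [] => (PySem.List.pyGet? intents 0).getD ""   -- intents[0]; Pre_ excludes the IndexError case
  | p :: ps => if intents.contains p then p else pvALoop intents ps

def resolve_tie_py (intents : List String) (text : String) : String :=
  pvALoop intents pvPriorityOrder

-- ===== PORT B =====
-- rank = {name: i for i, name in enumerate(_PRIORITY_ORDER)}
def pvRank : PySem.Dict String Int :=
  (PySem.List.enumerate pvPriorityOrder 0).foldl (fun d p => d.insert p.2 p.1) PySem.Dict.empty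

def resolve_tie_py_alt (intents : List String) (text : String) : String :=
  let sentinel : Int := (pvPriorityOrder.length : Int)
  let best := (PySem.List.pyGet? intents 0).getD ""   -- intents[0]; Pre_ excludes the IndexError case
  let bestRank := pvRank.getD best sentinel
  let st := (PySem.List.slice intents (some 1) none).foldl
    (fun (st : String × Int) intent =>
      let r := pvRank.getD intent sentinel
      if r < st.2 then (intent, r) else st)
    (best, bestRank)
  st.1

-- ===== PRECONDITION & SPEC =====
-- Pre_ excludes the empty candidate list, on which A raises IndexError (intents[0]).
def Pre_resolve_tie_py (intents : List String) (text : String) : Prop := intents ≠ []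
instance (intents : List String) (text : String) : Decidable (Pre_resolve_tie_py intents text) := by unfold Pre_resolve_tie_py; infer_instance
def pvWitness_resolve_tie_py : List String × String := (["foo", "practice_testing"], "hi")

def Spec_resolve_tie_py (intents : List String) (text : String) (out : String) : Prop := out = resolve_tie_py_alt intents text
instance (intents : List String) (text : String) (out : String) : Decidable (Spec_resolve_tie_py intents text out) := by unfold Spec_resolve_tie_py; infer_instance

-- ===== CLAIM (what is proved, stated in full; the proofs are below) =====
def Claim_equal_resolve_tie_py : Prop := ∀ (intents : List String) (text : String), Dom_resolve_tie_py intents text → Pre_resolve_tie_py intents text → Spec_resolve_tie_py intents text (resolve_tie_py intents text)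

-- ===== LEMMAS AND PROOFS =====

-- rank of a string: its index in the priority list, 6 if absent
def pvR (s : String) : Int :=
  if s = "knowledge_query" then 0
  else if s = "learning_explanation" then 1
  else if s = "practice_testing" then 2
  else if s = "progress_review" then 3
  else if s = "emotional_support" then 4
  else if s = "system_configuration" then 5
  else 6

lemma pvRank_eq : pvRank = PySem.Dict.mk [("knowledge_query",0),("learning_explanation",1),("practice_testing",2),("progress_review",3),("emotional_support",4),("system_configuration",5)] := by rfl

lemma pvRank_getD (s : String) : pvRank.getD s 6 = pvR s := by
  rw [PySem.Dict.getD, pvRank_eq]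
  simp only [PySem.Dict.get?_mk_cons, beq_iff_eq, pvR]
  split_ifs <;> subst_vars <;> first | rfl | simp_all

lemma pvR_nonneg (s : String) : 0 ≤ pvR s := by
  unfold pvR; split_ifs <;> omega

lemma pvR_le6 (s : String) : pvR s ≤ 6 := by
  unfold pvR; split_ifs <;> omega

lemma pvR0 (s : String) (h : pvR s = 0) : s = "knowledge_query" := by
  unfold pvR at h; split_ifs at h <;> first | assumption | omega
lemma pvR1 (s : String) (h : pvR s = 1) : s = "learning_explanation" := by
  unfold pvR at h; split_ifs at h <;> first | assumption | omega
lemma pvR2 (s : String) (h : pvR s = 2) : s = "practice_testing" := by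
  unfold pvR at h; split_ifs at h <;> first | assumption | omega
lemma pvR3 (s : String) (h : pvR s = 3) : s = "progress_review" := by
  unfold pvR at h; split_ifs at h <;> first | assumption | omega
lemma pvR4 (s : String) (h : pvR s = 4) : s = "emotional_support" := by
  unfold pvR at h; split_ifs at h <;> first | assumption | omega
lemma pvR5 (s : String) (h : pvR s = 5) : s = "system_configuration" := by
  unfold pvR at h; split_ifs at h <;> first | assumption | omega

-- B's fold, with the dict lookup replaced by pvR
def pvBLoop (l : List String) (st : String × Int) : String × Int :=
  l.foldl (fun st intent => if pvR intent < st.2 then (intent, pvR intent) else st) st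

lemma pvBLoop_eq (l : List String) (st : String × Int) :
    l.foldl (fun (st : String × Int) intent =>
      if pvRank.getD intent ((pvPriorityOrder.length : Nat) : Int) < st.2
      then (intent, pvRank.getD intent ((pvPriorityOrder.length : Nat) : Int)) else st) st
    = pvBLoop l st := by
  unfold pvBLoop
  congr 1
  funext st intent
  rw [show ((pvPriorityOrder.length : Nat) : Int) = 6 from rfl, pvRank_getD]

lemma pvBLoop_snd (l : List String) (b : String) :
    (pvBLoop l (b, pvR b)).2 = l.foldl (fun m x => min m (pvR x)) (pvR b) := by
  induction l generalizing b with
  | nil => simp [pvBLoop]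
  | cons x xs ih =>
    simp only [pvBLoop, List.foldl_cons] at *
    by_cases h : pvR x < pvR b
    · rw [if_pos h, ih x, min_eq_right (le_of_lt h)]
    · rw [if_neg h, ih b, min_eq_left (by omega)]

lemma pvBLoop_mem (l : List String) (b : String) :
    (pvBLoop l (b, pvR b)).1 = b ∨ (pvBLoop l (b, pvR b)).1 ∈ l := by
  induction l generalizing b with
  | nil => simp [pvBLoop]
  | cons x xs ih =>
    simp only [pvBLoop, List.foldl_cons] at *
    by_cases h : pvR x < pvR b
    · rw [if_pos h]
      rcases ih x with h1 | h1 <;> right <;> simp [h1]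
    · rw [if_neg h]
      rcases ih b with h1 | h1 <;> simp [h1]

lemma pvBLoop_rank (l : List String) (b : String) :
    pvR ((pvBLoop l (b, pvR b)).1) = (pvBLoop l (b, pvR b)).2 := by
  induction l generalizing b with
  | nil => simp [pvBLoop]
  | cons x xs ih =>
    simp only [pvBLoop, List.foldl_cons] at *
    by_cases h : pvR x < pvR b
    · rw [if_pos h]; exact ih x
    · rw [if_neg h]; exact ih b

lemma pvFold_min_le_init (l : List String) (i : Int) :
    l.foldl (fun m x => min m (pvR x)) i ≤ i := by
  induction l generalizing i with
  | nil => simp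
  | cons x xs ih =>
    simp only [List.foldl_cons]
    exact (ih _).trans (min_le_left _ _)

lemma pvFold_min_le (l : List String) (i : Int) (x : String) (hx : x ∈ l) :
    l.foldl (fun m x => min m (pvR x)) i ≤ pvR x := by
  induction l generalizing i with
  | nil => cases hx
  | cons y ys ih =>
    simp only [List.foldl_cons]
    rcases List.mem_cons.mp hx with rfl | h
    · exact (pvFold_min_le_init ys _).trans (min_le_right _ _)
    · exact ih _ h

lemma pvBLoop_all6 (l : List String) (b : String) (hb : pvR b = 6)
    (hl : ∀ x ∈ l, pvR x = 6) : (pvBLoop l (b, pvR b)).1 = b := by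
  induction l generalizing b with
  | nil => simp [pvBLoop]
  | cons x xs ih =>
    simp only [pvBLoop, List.foldl_cons] at *
    have hx6 : pvR x = 6 := hl x List.mem_cons_self
    rw [if_neg (by omega)]
    exact ih b hb (fun y hy => hl y (List.mem_cons_of_mem _ hy))

theorem resolve_tie_py_spec : Claim_equal_resolve_tie_py := by
  intro intents text _ hpre
  unfold Spec_resolve_tie_py resolve_tie_py resolve_tie_py_alt
  obtain ⟨hd, tl, rfl⟩ := List.exists_cons_of_ne_nil hpre
  simp only [PySem.List.slice_from_one, List.tail_cons]
  rw [show (PySem.List.pyGet? (hd :: tl) 0).getD "" = hd from by simp [PySem.List.pyGet?, PySem.List.pyIdx?]]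
  show pvALoop (hd :: tl) pvPriorityOrder =
    (tl.foldl (fun (st : String × Int) intent =>
      if pvRank.getD intent ((pvPriorityOrder.length : Nat) : Int) < st.2
      then (intent, pvRank.getD intent ((pvPriorityOrder.length : Nat) : Int)) else st)
      (hd, pvRank.getD hd ((pvPriorityOrder.length : Nat) : Int))).1
  rw [show pvRank.getD hd ((pvPriorityOrder.length : Nat) : Int) = pvR hd from by
        rw [show ((pvPriorityOrder.length : Nat) : Int) = 6 from rfl, pvRank_getD],
      pvBLoop_eq]
  set z := (pvBLoop tl (hd, pvR hd)).1 with hz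
  have hzmem : z ∈ hd :: tl := by
    rcases pvBLoop_mem tl hd with h | h
    · rw [hz, h]; exact List.mem_cons_self
    · exact List.mem_cons_of_mem _ h
  have hzle : ∀ x ∈ hd :: tl, pvR z ≤ pvR x := by
    intro x hx
    rw [hz, pvBLoop_rank, pvBLoop_snd]
    rcases List.mem_cons.mp hx with rfl | h
    · exact pvFold_min_le_init tl _
    · exact pvFold_min_le tl _ x h
  have hzc : (hd :: tl).contains z = true := List.contains_iff_mem.mpr hzmem
  have hnm : ∀ name : String, pvR name < pvR z → ¬ ((hd :: tl).contains name = true) := by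
    intro name hlt hc
    exact absurd (hzle name (List.contains_iff_mem.mp hc)) (by omega)
  have h0 : (0:Int) ≤ pvR z := pvR_nonneg z
  show (if (hd :: tl).contains "knowledge_query" then "knowledge_query"
        else pvALoop (hd :: tl) ["learning_explanation", "practice_testing",
          "progress_review", "emotional_support", "system_configuration"]) = z
  by_cases c0 : z = "knowledge_query"
  · rw [if_pos (c0 ▸ hzc), c0]
  · have g0 : (0:Int) < pvR z := lt_of_le_of_ne h0 (fun h => c0 (pvR0 z h.symm))
    rw [if_neg (hnm _ (by rw [show pvR "knowledge_query" = 0 from rfl]; omega))]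
    show (if (hd :: tl).contains "learning_explanation" then "learning_explanation"
          else pvALoop (hd :: tl) ["practice_testing",
            "progress_review", "emotional_support", "system_configuration"]) = z
    by_cases c1 : z = "learning_explanation"
    · rw [if_pos (c1 ▸ hzc), c1]
    · have g1 : (1:Int) < pvR z := lt_of_le_of_ne g0 (fun h => c1 (pvR1 z h.symm))
      rw [if_neg (hnm _ (by rw [show pvR "learning_explanation" = 1 from rfl]; omega))]
      show (if (hd :: tl).contains "practice_testing" then "practice_testing"
            else pvALoop (hd :: tl) ["progress_review", "emotional_support", "system_configuration"]) = z
      by_cases c2 : z = "practice_testing"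
      · rw [if_pos (c2 ▸ hzc), c2]
      · have g2 : (2:Int) < pvR z := lt_of_le_of_ne g1 (fun h => c2 (pvR2 z h.symm))
        rw [if_neg (hnm _ (by rw [show pvR "practice_testing" = 2 from rfl]; omega))]
        show (if (hd :: tl).contains "progress_review" then "progress_review"
              else pvALoop (hd :: tl) ["emotional_support", "system_configuration"]) = z
        by_cases c3 : z = "progress_review"
        · rw [if_pos (c3 ▸ hzc), c3]
        · have g3 : (3:Int) < pvR z := lt_of_le_of_ne g2 (fun h => c3 (pvR3 z h.symm))
          rw [if_neg (hnm _ (by rw [show pvR "progress_review" = 3 from rfl]; omega))]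
          show (if (hd :: tl).contains "emotional_support" then "emotional_support"
                else pvALoop (hd :: tl) ["system_configuration"]) = z
          by_cases c4 : z = "emotional_support"
          · rw [if_pos (c4 ▸ hzc), c4]
          · have g4 : (4:Int) < pvR z := lt_of_le_of_ne g3 (fun h => c4 (pvR4 z h.symm))
            rw [if_neg (hnm _ (by rw [show pvR "emotional_support" = 4 from rfl]; omega))]
            show (if (hd :: tl).contains "system_configuration" then "system_configuration"
                  else pvALoop (hd :: tl) []) = z
            by_cases c5 : z = "system_configuration"
            · rw [if_pos (c5 ▸ hzc), c5]
            · have g5 : (5:Int) < pvR z := lt_of_le_of_ne g4 (fun h => c5 (pvR5 z h.symm))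
              rw [if_neg (hnm _ (by rw [show pvR "system_configuration" = 5 from rfl]; omega))]
              -- all priority names missing from intents: B never updates, A falls back to intents[0]
              have h6 : pvR z = 6 := by
                have := pvR_le6 z; omega
              have hall6 : ∀ x ∈ hd :: tl, pvR x = 6 := by
                intro x hx
                have h1 := hzle x hx
                have h2 := pvR_le6 x
                omega
              have hB : z = hd := by
                rw [hz]
                exact pvBLoop_all6 tl hd (hall6 hd List.mem_cons_self)
                  (fun x hx => hall6 x (List.mem_cons_of_mem _ hx))
              show (PySem.List.pyGet? (hd :: tl) 0).getD "" = z
              rw [hB]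
              simp [PySem.List.pyGet?, PySem.List.pyIdx?]
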